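-- pv_equiv track=rewrite | github.com/OpenLLM-France/Luciole-Training | data/tokenization/train/data.py | norm_config_name
-- ===== SOURCE A (Python) =====
-- def is_default(name):
--     return name.lower() == "default"
--
-- def norm_config_name(name):
--     if is_default(name):
--         return "default"
--
--     _languages = ["en", "fr", "es", "de", "it"]
--     if not any(char in name for char in ["/", "_", "-"]) and name[0].isupper():
--         # Already normalized (ex: "CroissantAligned")
--         nname = name
--     elif any(name.startswith(lan + "/") for lan in _languages):
--         # Already normalized (ex: "fr/Claire")
--         nname = name
--     else:
--         nname = name.replace("_", "-")
--         f = nname.split("-")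
--         # "Claire-fr" -> "fr/Claire"
--         if any(nname.endswith("-" + lan) for lan in _languages):
--             nname = f[-1] + "/" + norm_config_name("-".join(f[:-1]))
--         else:
--             # Convert to CamelCase (ex: "croissant-aligned" -> "CroissantAligned")
--             nname = "".join([field.capitalize() for field in f])
--
--     return nname
-- ===== SOURCE B (Python) =====
-- def norm_config_name(name):
--     # Single pass of top-level guards, then a slicing loop that peels the 3-character
--     # language suffixes from the end; the string is split only once, at the very end.
--     langs = ("en", "fr", "es", "de", "it")
--     if name.lower() == "default":
--         return "default"
--     if not any(sep in name for sep in "/_-") and name[0].isupper():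
--         return name
--     if any(name.startswith(lan + "/") for lan in langs):
--         return name
--     rem = name.replace("_", "-")
--     prefix = ""
--     while rem.lower() != "default" and rem[-3:] in ("-en", "-fr", "-es", "-de", "-it"):
--         prefix += rem[-2:] + "/"
--         rem = rem[:-3]
--     if rem.lower() == "default":
--         return prefix + "default"
--     if "-" not in rem and "/" not in rem and rem[0].isupper():
--         return prefix + rem
--     return prefix + "".join(field.capitalize() for field in rem.split("-"))
-- ===== Notes on version B (the rewrite author's own statement) =====
-- stated objective: alternative
-- what changed: A's self-recursion (which re-runs replace/split/join and all guards at every level) is replaced by one pass of the top-level guards followed by a slicing loop that peels the dash-plus-language suffixes off the end of the string while accumulating the language prefix, splitting the string only once at the very end.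
import Mathlib
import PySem

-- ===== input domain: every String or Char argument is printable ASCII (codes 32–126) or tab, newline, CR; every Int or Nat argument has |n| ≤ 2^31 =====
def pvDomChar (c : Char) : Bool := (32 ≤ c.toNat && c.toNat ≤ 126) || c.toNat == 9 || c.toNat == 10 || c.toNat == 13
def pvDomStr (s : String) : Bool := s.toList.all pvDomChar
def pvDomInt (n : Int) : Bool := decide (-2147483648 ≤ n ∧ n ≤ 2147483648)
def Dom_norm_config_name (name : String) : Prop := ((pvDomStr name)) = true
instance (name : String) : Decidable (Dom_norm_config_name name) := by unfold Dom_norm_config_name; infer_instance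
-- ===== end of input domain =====

-- B replaces A's self-recursion by one pass of top-level guards plus a slicing loop that
-- peels the 3-character language suffixes off the end of the string, splitting it only
-- once at the very end (return value only; no speed claim).

-- ===== PORT A =====
def pvLangs : List String := ["en", "fr", "es", "de", "it"]

def pv_is_default (name : String) : Bool := PySem.Str.lower name == "default"

-- str.capitalize(), ported by hand (exact on the ASCII domain): first char uppercased, the rest lowercased
def pvCapitalize (s : String) : String :=
  match s.toList with
  | [] => ""
  | c :: cs => String.ofList (PySem.Chars.upperChar c :: PySem.Chars.lower cs)

-- A's recursion, with fuel (each recursive call shortens the string by 3, so |name|+1 fuel is never exhausted)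
def normA_go : Nat → String → String
  | 0, _ => ""
  | fuel + 1, name =>
    if pv_is_default name then "default"
    else if (!((["/", "_", "-"] : List String).any (fun ch => PySem.Str.isIn ch name))) &&
            ((PySem.Str.pyGet? name 0).elim false PySem.Chars.isupper) then
      -- name[0] on name = "" raises IndexError in Python (excluded by Pre_); `.elim false` is the total stand-in
      name
    else if pvLangs.any (fun lan => PySem.Str.startswith name (lan ++ "/")) then
      name
    else
      let nname := PySem.Str.replace name "_" "-"
      let f := (PySem.Str.split? nname "-").getD []   -- sep ≠ "", so split? is always `some`
      if pvLangs.any (fun lan => PySem.Str.endswith nname ("-" ++ lan)) then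
        PySem.List.pyGetD f (-1) "" ++ "/" ++ normA_go fuel (PySem.Str.join "-" (PySem.List.slice f none (some (-1))))
      else
        PySem.Str.join "" (f.map pvCapitalize)

def norm_config_name (name : String) : String := normA_go (name.toList.length + 1) name

-- ===== PORT B =====
def pvSufsB : List String := ["-en", "-fr", "-es", "-de", "-it"]

-- B's final step on the fully stripped remainder (it can contain no "_")
def normB_base (rem : String) : String :=
  if PySem.Str.lower rem == "default" then "default"
  else if !(PySem.Str.isIn "-" rem) && !(PySem.Str.isIn "/" rem) &&
          ((PySem.Str.pyGet? rem 0).elim false PySem.Chars.isupper) then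
    -- rem[0] on rem = "" raises IndexError in Python (excluded by Pre_); `.elim false` is the total stand-in
    rem
  else
    PySem.Str.join "" (((PySem.Str.split? rem "-").getD []).map pvCapitalize)

-- B's while loop: peel 3-character language suffixes off by slicing, accumulating the
-- language plus a slash onto `pre` (fuel |name|+1; each iteration shortens rem by 3)
def normB_loop : Nat → String → String → String
  | 0, pre, rem => pre ++ normB_base rem
  | fuel + 1, pre, rem =>
    if (!(PySem.Str.lower rem == "default")) &&
        pvSufsB.contains (PySem.Str.slice rem (some (-3)) none) then
      normB_loop fuel (pre ++ (PySem.Str.slice rem (some (-2)) none ++ "/"))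
        (PySem.Str.slice rem none (some (-3)))
    else pre ++ normB_base rem

def norm_config_name_alt (name : String) : String :=
  if PySem.Str.lower name == "default" then "default"
  else if (!((['/', '_', '-'] : List Char).any (fun sep => PySem.Chars.isIn [sep] name.toList))) &&
          ((PySem.Str.pyGet? name 0).elim false PySem.Chars.isupper) then
    name
  else if (["en", "fr", "es", "de", "it"] : List String).any
            (fun lan => PySem.Str.startswith name (lan ++ "/")) then
    name
  else
    normB_loop (name.toList.length + 1) "" (PySem.Str.replace name "_" "-")

-- ===== PRECONDITION & SPEC =====
-- Pre_ excludes exactly the inputs on which A raises IndexError (via name[0] on ""): the strings whose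
-- '_'→'-' normal form is a (possibly empty) concatenation of "-<language>" chunks, which A strips one by
-- one until the empty string reaches name[0].  B raises the same IndexError there.
def pvChunks : List Char → Bool
  | [] => true
  | '-' :: x :: y :: rest =>
      ((["en", "fr", "es", "de", "it"] : List String).contains (String.ofList [x, y])) && pvChunks rest
  | _ => false

def Pre_norm_config_name (name : String) : Prop :=
  pvChunks (PySem.Str.replace name "_" "-").toList = false

instance (name : String) : Decidable (Pre_norm_config_name name) := by
  unfold Pre_norm_config_name; infer_instance

def pvWitness_norm_config_name : String := "croissant_aligned-fr"

def Spec_norm_config_name (name : String) (out : String) : Prop := out = norm_config_name_alt name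
instance (name : String) (out : String) : Decidable (Spec_norm_config_name name out) := by
  unfold Spec_norm_config_name; infer_instance

-- ===== CLAIM (what is proved, stated in full; the proofs are below) =====
def Claim_equal_norm_config_name : Prop :=
  ∀ (name : String), Dom_norm_config_name name → Pre_norm_config_name name →
    Spec_norm_config_name name (norm_config_name name)

-- ===== LEMMAS AND PROOFS =====

-- '_' → '-' substitution on one character (what str.replace("_","-") does pointwise)
def pvSub (c : Char) : Char := if c = '_' then '-' else c

-- structural version of s.split("-")
def pvSplitD : List Char → List (List Char)
  | [] => [[]]
  | c :: rest => if c = '-' then [] :: pvSplitD rest else (pvSplitD rest).modifyHead (c :: ·)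

theorem pvSplitD_ne_nil (l : List Char) : pvSplitD l ≠ [] := by
  cases l with
  | nil => simp [pvSplitD]
  | cons c rest =>
    simp only [pvSplitD]
    split_ifs
    · simp
    · cases h : pvSplitD rest with
      | nil => exact absurd h (pvSplitD_ne_nil rest)
      | cons a t => simp [List.modifyHead]

theorem splitOn_go_eq (fuel : Nat) :
    ∀ (l cur : List Char) (acc : List (List Char)) (_ : l.length ≤ fuel),
    PySem.Chars.splitOn.go ['-'] fuel l cur acc
      = acc.reverse ++ (pvSplitD l).modifyHead (cur.reverse ++ ·) := by
  induction fuel with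
  | zero =>
    intro l cur acc h
    have : l = [] := List.length_eq_zero_iff.mp (Nat.le_zero.mp h)
    subst this
    simp [PySem.Chars.splitOn.go, pvSplitD]
  | succ fuel ih =>
    intro l cur acc h
    cases l with
    | nil => simp [PySem.Chars.splitOn.go, pvSplitD]
    | cons c t =>
      simp only [PySem.Chars.splitOn.go]
      by_cases hc : c = '-'
      · subst hc
        rw [if_pos (by simp [List.isPrefixOf])]
        rw [ih _ _ _ (by simpa using Nat.le_of_succ_le_succ h)]
        cases hs : pvSplitD t with
        | nil => exact absurd hs (pvSplitD_ne_nil t)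
        | cons a r => simp [pvSplitD, hs]
      · rw [if_neg (by simp [List.isPrefixOf]; exact fun e => hc e.symm)]
        rw [ih _ _ _ (by simpa using Nat.le_of_succ_le_succ h)]
        simp only [pvSplitD, if_neg hc]
        cases hs : pvSplitD t with
        | nil => exact absurd hs (pvSplitD_ne_nil t)
        | cons a r => simp [List.modifyHead]

theorem splitOn_dash (l : List Char) : PySem.Chars.splitOn l ['-'] = pvSplitD l := by
  have h := splitOn_go_eq (l.length + 1) l [] [] (by omega)
  rw [PySem.Chars.splitOn, h]
  cases hs : pvSplitD l with
  | nil => exact absurd hs (pvSplitD_ne_nil l)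
  | cons a r => simp

theorem pvSplitD_nodash {l : List Char} (h : '-' ∉ l) : pvSplitD l = [l] := by
  induction l with
  | nil => simp [pvSplitD]
  | cons c t ih =>
    have hc : c ≠ '-' := fun e => h (e ▸ List.mem_cons_self ..)
    simp [pvSplitD, hc, ih (fun m => h (List.mem_cons_of_mem _ m))]

theorem pvSplitD_append (t : List Char) {l2 : List Char} (h : '-' ∉ l2) :
    pvSplitD (t ++ '-' :: l2) = pvSplitD t ++ [l2] := by
  induction t with
  | nil => simp [pvSplitD, pvSplitD_nodash h]
  | cons c r ih =>
    by_cases hc : c = '-'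
    · simp [pvSplitD, hc, ih]
    · simp only [List.cons_append, pvSplitD, if_neg hc, ih]
      cases hs : pvSplitD r with
      | nil => exact absurd hs (pvSplitD_ne_nil r)
      | cons a q => simp

theorem intercalate_pvSplitD (t : List Char) :
    List.intercalate ['-'] (pvSplitD t) = t := by
  induction t with
  | nil => simp [pvSplitD, List.intercalate]
  | cons c r ih =>
    by_cases hc : c = '-'
    · subst hc
      cases hs : pvSplitD r with
      | nil => exact absurd hs (pvSplitD_ne_nil r)
      | cons a q =>
        simp only [pvSplitD, hs]
        rw [hs] at ih
        simp [List.intercalate] at ih ⊢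
        simpa using ih
    · cases hs : pvSplitD r with
      | nil => exact absurd hs (pvSplitD_ne_nil r)
      | cons a q =>
        simp only [pvSplitD, if_neg hc, hs, List.modifyHead]
        rw [hs] at ih
        cases q with
        | nil => simp [List.intercalate] at ih ⊢; simp [ih]
        | cons b q' =>
          simp [List.intercalate] at ih ⊢
          simpa using ih

theorem replace_go_eq (fuel : Nat) : ∀ (l acc : List Char) (_ : l.length ≤ fuel),
    PySem.Chars.replace.go ['_'] ['-'] fuel l acc = acc.reverse ++ l.map pvSub := by
  induction fuel with
  | zero =>
    intro l acc h
    have : l = [] := List.length_eq_zero_iff.mp (Nat.le_zero.mp h)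
    subst this; simp [PySem.Chars.replace.go]
  | succ fuel ih =>
    intro l acc h
    cases l with
    | nil => simp [PySem.Chars.replace.go]
    | cons c t =>
      simp only [PySem.Chars.replace.go]
      by_cases hc : c = '_'
      · subst hc
        rw [if_pos (by simp [List.isPrefixOf])]
        rw [ih _ _ (by simpa using Nat.le_of_succ_le_succ h)]
        simp [pvSub]
      · rw [if_neg (by simp [List.isPrefixOf]; exact fun e => hc e.symm)]
        rw [ih _ _ (by simpa using Nat.le_of_succ_le_succ h)]
        simp [pvSub, hc]

theorem replace_eq_map (l : List Char) :
    PySem.Chars.replace l ['_'] ['-'] = l.map pvSub := by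
  simp [PySem.Chars.replace, replace_go_eq l.length l [] (le_refl _)]

theorem map_pvSub_id {l : List Char} (h : '_' ∉ l) : l.map pvSub = l := by
  have : ∀ c ∈ l, pvSub c = c := by
    intro c hc
    have : c ≠ '_' := fun e => h (e ▸ hc)
    simp [pvSub, this]
  simpa using List.map_congr_left this

theorem usc_not_mem_map (l : List Char) : '_' ∉ l.map pvSub := by
  intro h
  obtain ⟨c, _, hc⟩ := List.mem_map.mp h
  by_cases e : c = '_' <;> simp [pvSub, e] at hc

theorem suffix_drop3 {s p : List Char} (hp : p.length = 3) :
    p <:+ s ↔ s.drop (s.length - 3) = p := by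
  constructor
  · rintro ⟨u, rfl⟩
    simp [hp, List.drop_left']
  · intro h
    exact h ▸ List.drop_suffix _ _

theorem prefix_map_pvSub {p l : List Char} (h : '-' ∉ p) :
    p <+: l.map pvSub → p <+: l := by
  induction p generalizing l with
  | nil => simp
  | cons a q ih =>
    cases l with
    | nil => simp
    | cons b t =>
      have hq : '-' ∉ q := fun m => h (List.mem_cons_of_mem _ m)
      have ha : a ≠ '-' := fun e => h (e ▸ List.mem_cons_self ..)
      simp only [List.map_cons, List.cons_prefix_cons]
      rintro ⟨e, hpre⟩
      refine ⟨?_, ih hq hpre⟩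
      by_cases hb : b = '_'
      · rw [hb] at e; simp [pvSub] at e; exact (ha e).elim
      · simpa [pvSub, hb] using e

-- ---- string-level facts ----

theorem toList_replace_usc (s : String) :
    (PySem.Str.replace s "_" "-").toList = s.toList.map pvSub := by
  show (String.ofList (PySem.Chars.replace s.toList "_".toList "-".toList)).toList = _
  rw [String.toList_ofList]
  exact replace_eq_map s.toList

theorem replace_id {s : String} (h : '_' ∉ s.toList) :
    PySem.Str.replace s "_" "-" = s := by
  apply String.toList_injective
  rw [toList_replace_usc, map_pvSub_id h]

theorem isIn_dash (s : String) : PySem.Str.isIn "-" s = true ↔ '-' ∈ s.toList := by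
  rw [PySem.Str.isIn_iff_infix]
  exact List.singleton_infix_iff _ _

theorem isIn_usc (s : String) : PySem.Str.isIn "_" s = true ↔ '_' ∈ s.toList := by
  rw [PySem.Str.isIn_iff_infix]
  exact List.singleton_infix_iff _ _

theorem default_no_dash {s : String} (h : (PySem.Str.lower s == "default") = true) :
    '-' ∉ s.toList := by
  intro hm
  have he : PySem.Str.lower s = "default" := beq_iff_eq.mp h
  have hl : PySem.Chars.lower s.toList = "default".toList := by
    rw [← PySem.Str.toList_lower, he]
  have : PySem.Chars.lowerChar '-' ∈ PySem.Chars.lower s.toList := by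
    exact List.mem_map_of_mem hm
  rw [hl] at this
  revert this
  decide

theorem no_dash_rem_eq {name : String}
    (h : '-' ∉ (PySem.Str.replace name "_" "-").toList) :
    PySem.Str.replace name "_" "-" = name := by
  have husc : '_' ∉ name.toList := by
    intro hm
    apply h
    rw [toList_replace_usc]
    exact List.mem_map.mpr ⟨'_', hm, by simp [pvSub]⟩
  exact replace_id husc

theorem lan_facts {lan : String} (h : lan ∈ pvLangs) :
    lan.toList.length = 2 ∧ '-' ∉ lan.toList ∧ ("-" ++ lan) ∈ pvSufsB := by
  fin_cases h <;> decide

-- last element / dropLast of an appended singleton through pyGetD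
theorem pyGetD_concat (ys : List String) (y : String) :
    PySem.List.pyGetD (ys ++ [y]) (-1) "" = y := by
  simp [PySem.List.pyGetD, PySem.List.pyGet?, PySem.List.pyIdx?]

-- the split A performs on a string ending in "-<lan>", described by slices
theorem step_facts {rem lan : String} (hu : '_' ∉ rem.toList) (hlan : lan ∈ pvLangs)
    (hE : PySem.Str.endswith rem ("-" ++ lan) = true) :
    (PySem.List.pyGetD ((PySem.Str.split? (PySem.Str.replace rem "_" "-") "-").getD []) (-1) ""
        = PySem.Str.slice rem (some (-2)) none)
    ∧ (PySem.Str.join "-" (PySem.List.slice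
          ((PySem.Str.split? (PySem.Str.replace rem "_" "-") "-").getD []) none (some (-1)))
        = PySem.Str.slice rem none (some (-3)))
    ∧ pvSufsB.contains (PySem.Str.slice rem (some (-3)) none) = true
    ∧ (PySem.Str.slice rem none (some (-3))).toList
        = rem.toList.take (rem.toList.length - 3) := by
  obtain ⟨hlen2, hnod, hmem⟩ := lan_facts hlan
  have hsuf : ('-' :: lan.toList) <:+ rem.toList := by
    have h1 := (PySem.Chars.endswith_iff rem.toList ("-" ++ lan).toList).mp (by simpa using hE)
    simpa [String.toList_append] using h1
  obtain ⟨t, ht⟩ := hsuf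
  have hlenL : rem.toList.length = t.length + 3 := by
    rw [← ht]; simp [hlen2]
  have hrepl : PySem.Str.replace rem "_" "-" = rem := replace_id hu
  have hf : (PySem.Str.split? (PySem.Str.replace rem "_" "-") "-").getD []
      = (pvSplitD t).map String.ofList ++ [String.ofList lan.toList] := by
    rw [hrepl]
    show ((PySem.Chars.split? rem.toList ("-" : String).toList).map (List.map String.ofList)).getD [] = _
    rw [show ("-" : String).toList = ['-'] from rfl, PySem.Chars.split?]
    simp only [List.isEmpty_cons, Bool.false_eq_true, if_false, Option.map_some, Option.getD_some]
    rw [splitOn_dash, ← ht, pvSplitD_append t hnod]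
    simp
  have hslice3 : (PySem.Str.slice rem none (some (-3))).toList
      = rem.toList.take (rem.toList.length - 3) := by
    simp only [PySem.Str.slice, String.toList_ofList, PySem.Chars.slice_eq_listSlice]
    rw [PySem.List.slice_to_neg_ofNat rem.toList 3 (by norm_num)]
  have htake : rem.toList.take (rem.toList.length - 3) = t := by
    rw [hlenL, Nat.add_sub_cancel, ← ht]
    exact List.take_left
  refine ⟨?_, ?_, ?_, hslice3⟩
  · rw [hf, pyGetD_concat]
    apply String.toList_injective
    rw [String.toList_ofList]
    simp only [PySem.Str.slice, String.toList_ofList, PySem.Chars.slice_eq_listSlice]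
    rw [PySem.List.slice_from_neg_ofNat rem.toList 2 (by norm_num)]
    rw [hlenL, show t.length + 3 - 2 = t.length + 1 from by omega, ← ht]
    rw [List.drop_length_add_append]
    simp
  · rw [hf]
    rw [PySem.List.slice_to_neg_one, List.dropLast_concat]
    apply String.toList_injective
    rw [hslice3, htake]
    show (String.ofList (PySem.Chars.join ("-" : String).toList
        (((pvSplitD t).map String.ofList).map String.toList))).toList = t
    rw [String.toList_ofList, show ("-" : String).toList = ['-'] from rfl]
    have : ((pvSplitD t).map String.ofList).map String.toList = pvSplitD t := by
      rw [List.map_map]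
      have h2 : ∀ x ∈ pvSplitD t, (String.toList ∘ String.ofList) x = x :=
        fun x _ => String.toList_ofList
      simpa using List.map_congr_left h2
    rw [this]
    exact intercalate_pvSplitD t
  · have hsl : PySem.Str.slice rem (some (-3)) none = "-" ++ lan := by
      apply String.toList_injective
      simp only [PySem.Str.slice, String.toList_ofList, PySem.Chars.slice_eq_listSlice]
      rw [PySem.List.slice_from_neg_ofNat rem.toList 3 (by norm_num)]
      rw [hlenL, Nat.add_sub_cancel, ← ht]
      rw [show (t.length : Nat) = t.length + 0 from rfl, List.drop_length_add_append]
      simp [String.toList_append]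
    rw [hsl]
    exact List.contains_iff_mem.mpr hmem

theorem drop3_of_slice {rem p : String}
    (hsl : PySem.Str.slice rem (some (-3)) none = p) :
    rem.toList.drop (rem.toList.length - 3) = p.toList := by
  rw [← hsl]
  simp only [PySem.Str.slice, String.toList_ofList, PySem.Chars.slice_eq_listSlice]
  rw [PySem.List.slice_from_neg_ofNat rem.toList 3 (by norm_num)]

theorem endsw_of_slice3 {rem p : String} (h3 : p.toList.length = 3)
    (hsl : PySem.Str.slice rem (some (-3)) none = p) :
    PySem.Str.endswith rem p = true := by
  have hs : p.toList <:+ rem.toList := (suffix_drop3 h3).mpr (drop3_of_slice hsl)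
  simpa using (PySem.Chars.endswith_iff _ _).mpr hs

theorem contains_imp_endsw {rem : String}
    (h : pvSufsB.contains (PySem.Str.slice rem (some (-3)) none) = true) :
    (pvLangs.any (fun lan => PySem.Str.endswith rem ("-" ++ lan))) = true := by
  have hx := List.contains_iff_mem.mp h
  simp only [pvSufsB, List.mem_cons, List.not_mem_nil, or_false] at hx
  rcases hx with h1 | h1 | h1 | h1 | h1
  · exact List.any_eq_true.mpr ⟨"en", by simp [pvLangs],
      by rw [show ("-" : String) ++ "en" = "-en" from rfl]; exact endsw_of_slice3 (by decide) h1⟩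
  · exact List.any_eq_true.mpr ⟨"fr", by simp [pvLangs],
      by rw [show ("-" : String) ++ "fr" = "-fr" from rfl]; exact endsw_of_slice3 (by decide) h1⟩
  · exact List.any_eq_true.mpr ⟨"es", by simp [pvLangs],
      by rw [show ("-" : String) ++ "es" = "-es" from rfl]; exact endsw_of_slice3 (by decide) h1⟩
  · exact List.any_eq_true.mpr ⟨"de", by simp [pvLangs],
      by rw [show ("-" : String) ++ "de" = "-de" from rfl]; exact endsw_of_slice3 (by decide) h1⟩
  · exact List.any_eq_true.mpr ⟨"it", by simp [pvLangs],
      by rw [show ("-" : String) ++ "it" = "-it" from rfl]; exact endsw_of_slice3 (by decide) h1⟩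

theorem contains_imp_dash {rem : String}
    (h : pvSufsB.contains (PySem.Str.slice rem (some (-3)) none) = true) :
    '-' ∈ rem.toList := by
  have hx := List.contains_iff_mem.mp h
  simp only [pvSufsB, List.mem_cons, List.not_mem_nil, or_false] at hx
  have hmem : '-' ∈ rem.toList.drop (rem.toList.length - 3) := by
    rcases hx with h1 | h1 | h1 | h1 | h1 <;> rw [drop3_of_slice h1] <;> decide
  exact List.mem_of_mem_drop hmem

theorem guards_eq {rem : String} (hu : '_' ∉ rem.toList) :
    ((!((["/", "_", "-"] : List String).any (fun ch => PySem.Str.isIn ch rem))) &&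
      ((PySem.Str.pyGet? rem 0).elim false PySem.Chars.isupper))
    = (!(PySem.Str.isIn "-" rem) && !(PySem.Str.isIn "/" rem) &&
      ((PySem.Str.pyGet? rem 0).elim false PySem.Chars.isupper)) := by
  have h_ : PySem.Str.isIn "_" rem = false := by
    rw [Bool.eq_false_iff]
    intro ht
    exact hu ((isIn_usc rem).mp ht)
  simp only [List.any_cons, List.any_nil, h_]
  cases PySem.Str.isIn "-" rem <;> cases PySem.Str.isIn "/" rem <;>
    cases ((PySem.Str.pyGet? rem 0).elim false PySem.Chars.isupper) <;> rfl

theorem guard2_take {rem rem' : String} {k : Nat} (h : rem'.toList = rem.toList.take k)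
    (hg : (pvLangs.any (fun lan => PySem.Str.startswith rem (lan ++ "/"))) = false) :
    (pvLangs.any (fun lan => PySem.Str.startswith rem' (lan ++ "/"))) = false := by
  apply List.any_eq_false.mpr
  intro l hl hp
  have hpre : (l ++ "/").toList <+: rem'.toList := by
    have h5 := (PySem.Chars.startswith_iff _ _).mp (by simpa using hp)
    simpa [String.toList_append] using h5
  have hpre2 : (l ++ "/").toList <+: rem.toList := by
    rw [h] at hpre
    exact hpre.trans (List.take_prefix _ _)
  have hst : PySem.Str.startswith rem (l ++ "/") = true := by
    simpa using (PySem.Chars.startswith_iff _ _).mpr hpre2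
  exact (List.any_eq_false.mp hg l hl) hst

theorem normA_go_succ (fuel : Nat) (name : String) : normA_go (fuel + 1) name =
    (if pv_is_default name then "default"
    else if (!((["/", "_", "-"] : List String).any (fun ch => PySem.Str.isIn ch name))) &&
            ((PySem.Str.pyGet? name 0).elim false PySem.Chars.isupper) then
      name
    else if pvLangs.any (fun lan => PySem.Str.startswith name (lan ++ "/")) then
      name
    else
      let nname := PySem.Str.replace name "_" "-"
      let f := (PySem.Str.split? nname "-").getD []
      if pvLangs.any (fun lan => PySem.Str.endswith nname ("-" ++ lan)) then
        PySem.List.pyGetD f (-1) "" ++ "/" ++ normA_go fuel (PySem.Str.join "-" (PySem.List.slice f none (some (-1))))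
      else
        PySem.Str.join "" (f.map pvCapitalize)) := rfl

theorem normB_loop_succ (fuel : Nat) (pre rem : String) : normB_loop (fuel + 1) pre rem =
    (if (!(PySem.Str.lower rem == "default")) &&
        pvSufsB.contains (PySem.Str.slice rem (some (-3)) none) then
      normB_loop fuel (pre ++ (PySem.Str.slice rem (some (-2)) none ++ "/"))
        (PySem.Str.slice rem none (some (-3)))
    else pre ++ normB_base rem) := rfl

-- the main loop correspondence: A's recursion with a prefix accumulated outside
-- equals B's slicing loop
theorem mainAB (fa : Nat) : ∀ (fb : Nat) (pre rem : String),
    '_' ∉ rem.toList →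
    (pvLangs.any (fun lan => PySem.Str.startswith rem (lan ++ "/"))) = false →
    rem.toList.length ≤ 3 * fa → rem.toList.length ≤ 3 * fb →
    pre ++ normA_go (fa + 1) rem = normB_loop (fb + 1) pre rem := by
  induction fa with
  | zero =>
    intro fb pre rem hu hg2 hla hlb
    have hrem : rem = "" := by
      apply String.toList_injective
      have h0 : rem.toList.length = 0 := by omega
      rw [List.length_eq_zero_iff.mp h0]; rfl
    subst hrem
    rw [show normA_go 1 "" = "" from by decide]
    rw [normB_loop_succ]
    rw [if_neg (show ¬ ((!(PySem.Str.lower "" == "default")) &&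
      pvSufsB.contains (PySem.Str.slice "" (some (-3)) none)) = true from by decide)]
    rw [show normB_base "" = "" from by decide]
  | succ n ih =>
    intro fb pre rem hu hg2 hla hlb
    rw [normA_go_succ, normB_loop_succ]
    by_cases hd : pv_is_default rem = true
    · rw [if_pos hd]
      have hB : (PySem.Str.lower rem == "default") = true := hd
      rw [if_neg (Bool.eq_false_iff.mp (show ((!(PySem.Str.lower rem == "default")) &&
        pvSufsB.contains (PySem.Str.slice rem (some (-3)) none)) = false from by rw [hB]; rfl))]
      rw [normB_base, if_pos hB]
    · rw [if_neg hd]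
      have hBd : (!(PySem.Str.lower rem == "default")) = true := by
        cases h : (PySem.Str.lower rem == "default") with
        | true => exact absurd h hd
        | false => rfl
      by_cases hg1 : ((!((["/", "_", "-"] : List String).any (fun ch => PySem.Str.isIn ch rem))) &&
          ((PySem.Str.pyGet? rem 0).elim false PySem.Chars.isupper)) = true
      · rw [if_pos hg1]
        have hnd : PySem.Str.isIn "-" rem = false := by
          rcases Bool.and_eq_true .. |>.mp hg1 with ⟨h1, _⟩
          simp only [List.any_cons, List.any_nil, Bool.or_false, Bool.not_or,
            Bool.and_eq_true, Bool.not_eq_eq_eq_not, Bool.not_true] at h1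
          exact h1.2.2
        have hcont : pvSufsB.contains (PySem.Str.slice rem (some (-3)) none) = false := by
          rw [Bool.eq_false_iff]
          intro hc
          rw [Bool.eq_false_iff] at hnd
          exact hnd ((isIn_dash rem).mpr (contains_imp_dash hc))
        rw [if_neg (Bool.eq_false_iff.mp (show ((!(PySem.Str.lower rem == "default")) &&
          pvSufsB.contains (PySem.Str.slice rem (some (-3)) none)) = false from by
            rw [hcont]; simp))]
        rw [normB_base, if_neg (show ¬ (PySem.Str.lower rem == "default") = true from fun h => hd h),
          if_pos (by rw [← guards_eq hu]; exact hg1)]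
      · rw [if_neg hg1, if_neg (Bool.eq_false_iff.mp hg2)]
        by_cases hS : (pvLangs.any (fun lan =>
            PySem.Str.endswith (PySem.Str.replace rem "_" "-") ("-" ++ lan))) = true
        · -- stripping step
          obtain ⟨lan, hlanmem, hE⟩ := List.any_eq_true.mp hS
          rw [replace_id hu] at hE
          obtain ⟨ha, hb, hc, hsl⟩ := step_facts hu hlanmem hE
          rw [if_pos hS]
          rw [if_pos (show ((!(PySem.Str.lower rem == "default")) &&
            pvSufsB.contains (PySem.Str.slice rem (some (-3)) none)) = true from by
              rw [hBd, hc]; rfl)]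
          have hlen3 : 3 ≤ rem.toList.length := by
            have hsfx : ('-' :: lan.toList) <:+ rem.toList := by
              have h1 := (PySem.Chars.endswith_iff rem.toList ("-" ++ lan).toList).mp
                (by simpa using hE)
              simpa [String.toList_append] using h1
            have h3 := hsfx.length_le
            obtain ⟨h2, -, -⟩ := lan_facts hlanmem
            rw [List.length_cons, h2] at h3
            omega
          rw [ha, hb]
          rcases fb with _ | m
          · exact absurd hlb (by omega)
          · have hlist : (PySem.Str.slice rem none (some (-3))).toList.length
                = rem.toList.length - 3 := by
              rw [hsl, List.length_take]; omega
            have h1 : '_' ∉ (PySem.Str.slice rem none (some (-3))).toList := by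
              rw [hsl]
              exact fun hm => hu (List.mem_of_mem_take hm)
            have h2 : (pvLangs.any (fun lan => PySem.Str.startswith
                (PySem.Str.slice rem none (some (-3))) (lan ++ "/"))) = false :=
              guard2_take hsl hg2
            have hrec := ih m (pre ++ (PySem.Str.slice rem (some (-2)) none ++ "/"))
              (PySem.Str.slice rem none (some (-3))) h1 h2 (by omega) (by omega)
            rw [← hrec]
            simp [String.append_assoc]
        · rw [if_neg hS]
          have hcont : pvSufsB.contains (PySem.Str.slice rem (some (-3)) none) = false := by
            rw [Bool.eq_false_iff]
            intro hcc
            rw [replace_id hu] at hS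
            exact hS (contains_imp_endsw hcc)
          rw [if_neg (Bool.eq_false_iff.mp (show ((!(PySem.Str.lower rem == "default")) &&
            pvSufsB.contains (PySem.Str.slice rem (some (-3)) none)) = false from by
              rw [hcont]; simp))]
          rw [normB_base, if_neg (show ¬ (PySem.Str.lower rem == "default") = true from fun h => hd h),
            if_neg (by rw [← guards_eq hu]; exact hg1), replace_id hu]

theorem hBd_top {name : String} (hd : ¬ pv_is_default name = true) :
    (PySem.Str.lower (PySem.Str.replace name "_" "-") == "default") = false := by
  cases h : (PySem.Str.lower (PySem.Str.replace name "_" "-") == "default") with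
  | false => rfl
  | true =>
    have heq := no_dash_rem_eq (default_no_dash h)
    rw [heq] at h
    exact absurd h hd

theorem guard2_replace {name : String}
    (hg2 : (pvLangs.any (fun lan => PySem.Str.startswith name (lan ++ "/"))) = false) :
    (pvLangs.any (fun lan =>
      PySem.Str.startswith (PySem.Str.replace name "_" "-") (lan ++ "/"))) = false := by
  apply List.any_eq_false.mpr
  intro l hl hp
  have hpre : (l ++ "/").toList <+: (PySem.Str.replace name "_" "-").toList := by
    have h5 := (PySem.Chars.startswith_iff _ _).mp (by simpa using hp)
    simpa [String.toList_append] using h5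
  rw [toList_replace_usc] at hpre
  have hnd : '-' ∉ (l ++ "/").toList := by
    fin_cases hl <;> decide
  have hpre2 := prefix_map_pvSub hnd hpre
  have hst : PySem.Str.startswith name (l ++ "/") = true := by
    simpa using (PySem.Chars.startswith_iff _ _).mpr (by simpa [String.toList_append] using hpre2)
  exact (List.any_eq_false.mp hg2 l hl) hst

theorem base2_false {name : String}
    (hg1 : ¬ ((!((["/", "_", "-"] : List String).any (fun ch => PySem.Str.isIn ch name))) &&
      ((PySem.Str.pyGet? name 0).elim false PySem.Chars.isupper)) = true) :
    (!(PySem.Str.isIn "-" (PySem.Str.replace name "_" "-")) &&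
      !(PySem.Str.isIn "/" (PySem.Str.replace name "_" "-")) &&
      ((PySem.Str.pyGet? (PySem.Str.replace name "_" "-") 0).elim false PySem.Chars.isupper)) = false := by
  cases hbg : (!(PySem.Str.isIn "-" (PySem.Str.replace name "_" "-")) &&
      !(PySem.Str.isIn "/" (PySem.Str.replace name "_" "-")) &&
      ((PySem.Str.pyGet? (PySem.Str.replace name "_" "-") 0).elim false PySem.Chars.isupper)) with
  | false => rfl
  | true =>
    exfalso
    have hnd : '-' ∉ (PySem.Str.replace name "_" "-").toList := by
      rcases Bool.and_eq_true .. |>.mp hbg with ⟨h1, -⟩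
      rcases Bool.and_eq_true .. |>.mp h1 with ⟨h2, -⟩
      rw [Bool.not_eq_eq_eq_not, Bool.not_true] at h2
      intro hm
      rw [(isIn_dash _).mpr hm] at h2
      simp at h2
    have heq := no_dash_rem_eq hnd
    rw [heq] at hbg
    have hu : '_' ∉ name.toList := by
      intro hm
      apply hnd
      rw [toList_replace_usc]
      exact List.mem_map.mpr ⟨'_', hm, by simp [pvSub]⟩
    rw [← guards_eq hu] at hbg
    exact hg1 hbg

-- ===== VERDICT (by name: the statement is the Claim_ definition above) =====
theorem norm_config_name_spec : Claim_equal_norm_config_name := by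
  intro name _ _
  unfold Spec_norm_config_name norm_config_name norm_config_name_alt
  rw [normA_go_succ]
  by_cases hd : pv_is_default name = true
  · rw [if_pos hd, if_pos (show (PySem.Str.lower name == "default") = true from hd)]
  · rw [if_neg hd,
      if_neg (show ¬ (PySem.Str.lower name == "default") = true from fun h => hd h)]
    by_cases hg1 : ((!((["/", "_", "-"] : List String).any (fun ch => PySem.Str.isIn ch name))) &&
        ((PySem.Str.pyGet? name 0).elim false PySem.Chars.isupper)) = true
    · rw [if_pos hg1, if_pos (show ((!((['/', '_', '-'] : List Char).any
        (fun sep => PySem.Chars.isIn [sep] name.toList))) &&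
        ((PySem.Str.pyGet? name 0).elim false PySem.Chars.isupper)) = true from hg1)]
    · rw [if_neg hg1, if_neg (show ¬ ((!((['/', '_', '-'] : List Char).any
        (fun sep => PySem.Chars.isIn [sep] name.toList))) &&
        ((PySem.Str.pyGet? name 0).elim false PySem.Chars.isupper)) = true from fun h => hg1 h)]
      by_cases hg2 : (pvLangs.any (fun lan => PySem.Str.startswith name (lan ++ "/"))) = true
      · rw [if_pos hg2, if_pos (show ((["en", "fr", "es", "de", "it"] : List String).any
          (fun lan => PySem.Str.startswith name (lan ++ "/"))) = true from hg2)]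
      · rw [if_neg hg2, if_neg (show ¬ ((["en", "fr", "es", "de", "it"] : List String).any
          (fun lan => PySem.Str.startswith name (lan ++ "/"))) = true from fun h => hg2 h)]
        rw [normB_loop_succ]
        have hu : '_' ∉ (PySem.Str.replace name "_" "-").toList := by
          rw [toList_replace_usc]; exact usc_not_mem_map _
        have hBd := hBd_top hd
        have hg2f : (pvLangs.any (fun lan => PySem.Str.startswith name (lan ++ "/"))) = false :=
          Bool.eq_false_iff.mpr hg2
        have hg2r := guard2_replace hg2f
        have hlenr : (PySem.Str.replace name "_" "-").toList.length = name.toList.length := by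
          rw [toList_replace_usc, List.length_map]
        by_cases hS : (pvLangs.any (fun lan =>
            PySem.Str.endswith (PySem.Str.replace name "_" "-") ("-" ++ lan))) = true
        · obtain ⟨lan, hlanmem, hE⟩ := List.any_eq_true.mp hS
          obtain ⟨ha, hb, hc, hsl⟩ := step_facts hu hlanmem hE
          rw [replace_id hu] at ha hb
          rw [if_pos hS]
          rw [if_pos (show ((!(PySem.Str.lower (PySem.Str.replace name "_" "-") == "default")) &&
            pvSufsB.contains (PySem.Str.slice (PySem.Str.replace name "_" "-")
              (some (-3)) none)) = true from by rw [hBd, hc]; rfl)]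
          rw [ha, hb]
          have hlen3 : 3 ≤ (PySem.Str.replace name "_" "-").toList.length := by
            have hsfx : ('-' :: lan.toList) <:+ (PySem.Str.replace name "_" "-").toList := by
              have h1 := (PySem.Chars.endswith_iff
                (PySem.Str.replace name "_" "-").toList ("-" ++ lan).toList).mp (by simpa using hE)
              simpa [String.toList_append] using h1
            have h3 := hsfx.length_le
            obtain ⟨h2, -, -⟩ := lan_facts hlanmem
            rw [List.length_cons, h2] at h3
            omega
          have h1 : '_' ∉ (PySem.Str.slice (PySem.Str.replace name "_" "-") none (some (-3))).toList := by
            rw [hsl]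
            exact fun hm => hu (List.mem_of_mem_take hm)
          have h2 := guard2_take hsl hg2r
          obtain ⟨k, hk⟩ : ∃ k, name.toList.length = k + 1 := ⟨name.toList.length - 1, by omega⟩
          rw [hk]
          have hmain := mainAB k k
            ("" ++ (PySem.Str.slice (PySem.Str.replace name "_" "-") (some (-2)) none ++ "/"))
            (PySem.Str.slice (PySem.Str.replace name "_" "-") none (some (-3)))
            h1 h2 (by rw [hsl, List.length_take]; omega) (by rw [hsl, List.length_take]; omega)
          rw [← hmain]
          simp [String.append_assoc]
        · rw [if_neg hS]
          have hcont : pvSufsB.contains (PySem.Str.slice (PySem.Str.replace name "_" "-")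
              (some (-3)) none) = false := by
            rw [Bool.eq_false_iff]
            intro hcc
            exact hS (contains_imp_endsw hcc)
          rw [if_neg (Bool.eq_false_iff.mp (show ((!(PySem.Str.lower (PySem.Str.replace name "_" "-") == "default")) &&
            pvSufsB.contains (PySem.Str.slice (PySem.Str.replace name "_" "-")
              (some (-3)) none)) = false from by rw [hcont]; simp))]
          rw [normB_base, if_neg (Bool.eq_false_iff.mp hBd),
            if_neg (Bool.eq_false_iff.mp (base2_false hg1))]
          rw [String.empty_append]
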